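-- pv_equiv track=rewrite | github.com/rolandjansky/athena | Database/AthenaPOOL/AthenaPoolUtilities/share/TPCnvTest.py | checknewvars
-- ===== SOURCE A (Python) =====
-- def checknewvars (output):
--     names = set()
--     for l in output.split ('\n'):
--         if not l: continue
--         if l.startswith ('+++') or l.startswith ('---'): continue
--         if l[0] == '-': return None
--         if l[0] == '+':
--             pos = l.find (':')
--             if l.startswith ('+     ') and pos > 0:
--                 names.add (l[6:pos])
--             else:
--                 return None
--     l = list(names)
--     l.sort()
--     return l
-- ===== SOURCE B (Python) =====
-- def checknewvars(output):
--     # Character-level streaming state machine: never splits the output into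
--     # lines; scans the characters once with a per-line automaton.
--     # states: 0 line start, 1 skip rest of line, 2 seen "-", 3 seen "--",
--     # 4 seen "+", 5 seen "++", 6..9 seen "+" plus 1..4 spaces,
--     # 10 inside a variable name (after "+     ").
--     names = set()
--     state = 0
--     buf = ''
--     for c in output + '\n':
--         if c == '\n':
--             if state > 1:
--                 return None
--             state = 0
--         elif state == 0:
--             if c == '-':
--                 state = 2
--             elif c == '+':
--                 state = 4
--             else:
--                 state = 1
--         elif state == 1:
--             pass
--         elif state == 2:
--             if c != '-':
--                 return None
--             state = 3
--         elif state == 3: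
--             if c != '-':
--                 return None
--             state = 1
--         elif state == 4:
--             if c == '+':
--                 state = 5
--             elif c == ' ':
--                 state = 6
--             else:
--                 return None
--         elif state == 5:
--             if c != '+':
--                 return None
--             state = 1
--         elif state <= 9:
--             if c != ' ':
--                 return None
--             state += 1
--         else:
--             if c == ':':
--                 names.add(buf)
--                 buf = ''
--                 state = 1
--             else:
--                 buf += c
--     return sorted(names)
-- ===== Notes on version B (the rewrite author's own statement) =====
-- stated objective: alternative
-- what changed: Replaces A's split-into-lines loop with a character-level streaming finite-state machine that scans the raw string once (never materialising the line list), tracking a per-line automaton state and a name buffer.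
import Mathlib
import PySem

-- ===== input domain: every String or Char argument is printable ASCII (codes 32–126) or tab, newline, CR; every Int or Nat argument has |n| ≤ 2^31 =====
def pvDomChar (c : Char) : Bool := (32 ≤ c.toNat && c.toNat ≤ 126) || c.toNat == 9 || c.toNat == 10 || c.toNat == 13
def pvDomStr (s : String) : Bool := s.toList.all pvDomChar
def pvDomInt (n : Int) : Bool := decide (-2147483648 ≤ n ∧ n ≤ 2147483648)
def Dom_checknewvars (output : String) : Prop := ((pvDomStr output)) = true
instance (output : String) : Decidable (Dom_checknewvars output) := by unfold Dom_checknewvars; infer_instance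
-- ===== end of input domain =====

-- B replaces A's split-into-lines loop by a character-level streaming state machine over the
-- raw string (objective: alternative; same results, no line list is ever built).

-- ===== PORT A =====
-- A's loop with early returns: recursion over the lines carrying the set accumulator.
def checknewvarsGo : List String → PySem.Set String → Option (List String)
  | [], names => some (PySem.List.sorted names (fun x => x) false)
  | l :: rest, names =>
    if l == "" then checknewvarsGo rest names
    else if PySem.Str.startswith l "+++" || PySem.Str.startswith l "---" then
      checknewvarsGo rest names
    else if PySem.Str.pyGet? l 0 == some '-' then none
    else if PySem.Str.pyGet? l 0 == some '+' then
      let pos := PySem.Str.find l ":"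
      if PySem.Str.startswith l "+     " && decide (0 < pos) then
        checknewvarsGo rest (PySem.Set.add names (PySem.Str.slice l (some 6) (some pos)))
      else none
    else checknewvarsGo rest names

def checknewvars (output : String) : Option (List String) :=
  checknewvarsGo (((PySem.Str.split? output "\n").getD [])) PySem.Set.empty

-- ===== PORT B =====
-- Source B's `for c in output + '\n'` loop: structural recursion over the character list,
-- carrying the automaton state (the same integer codes as Source B), the name buffer `buf`
-- (a string in Source B, kept as its character list here) and the set of names.
def checknewvarsAltGo : List Char → Nat → List Char → PySem.Set String → Option (List String)
  | [], _, _, names => some (PySem.List.sorted names (fun x => x) false)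
  | c :: cs, state, buf, names =>
    if c == '\n' then
      if state > 1 then none else checknewvarsAltGo cs 0 buf names
    else if state == 0 then
      if c == '-' then checknewvarsAltGo cs 2 buf names
      else if c == '+' then checknewvarsAltGo cs 4 buf names
      else checknewvarsAltGo cs 1 buf names
    else if state == 1 then checknewvarsAltGo cs 1 buf names
    else if state == 2 then
      if c != '-' then none else checknewvarsAltGo cs 3 buf names
    else if state == 3 then
      if c != '-' then none else checknewvarsAltGo cs 1 buf names
    else if state == 4 then
      if c == '+' then checknewvarsAltGo cs 5 buf names
      else if c == ' ' then checknewvarsAltGo cs 6 buf names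
      else none
    else if state == 5 then
      if c != '+' then none else checknewvarsAltGo cs 1 buf names
    else if state ≤ 9 then
      if c != ' ' then none else checknewvarsAltGo cs (state + 1) buf names
    else
      if c == ':' then checknewvarsAltGo cs 1 [] (PySem.Set.add names (String.ofList buf))
      else checknewvarsAltGo cs 10 (buf ++ [c]) names

def checknewvars_alt (output : String) : Option (List String) :=
  checknewvarsAltGo (output.toList ++ ['\n']) 0 [] PySem.Set.empty

-- ===== PRECONDITION & SPEC =====
def Spec_checknewvars (output : String) (out : Option (List String)) : Prop := out = checknewvars_alt output
instance (output : String) (out : Option (List String)) : Decidable (Spec_checknewvars output out) := by unfold Spec_checknewvars; infer_instance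

-- ===== CLAIM (what is proved, stated in full; the proofs are below) =====
def Claim_equal_checknewvars : Prop := ∀ (output : String), Dom_checknewvars output → Spec_checknewvars output (checknewvars output)

-- ===== LEMMAS AND PROOFS =====

-- The machine in skip state 1 ignores the rest of the line.
theorem altGo_skip (xs : List Char) (cs : List Char) (buf : List Char) (names : PySem.Set String)
    (h : '\n' ∉ xs) :
    checknewvarsAltGo (xs ++ '\n' :: cs) 1 buf names = checknewvarsAltGo cs 0 buf names := by
  induction xs with
  | nil => simp [checknewvarsAltGo]
  | cons c xs ih =>
    have hc : c ≠ '\n' := fun hh => h (hh ▸ List.mem_cons_self)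
    simp only [List.cons_append, checknewvarsAltGo, beq_iff_eq, hc, if_false, if_true]
    exact ih (fun hm => h (List.mem_cons_of_mem _ hm))

theorem altGo_name (xs : List Char) (cs : List Char) (buf : List Char) (names : PySem.Set String)
    (h : '\n' ∉ xs) :
    checknewvarsAltGo (xs ++ '\n' :: cs) 10 buf names =
      if ':' ∈ xs then
        checknewvarsAltGo cs 0 []
          (PySem.Set.add names (String.ofList (buf ++ xs.takeWhile (fun d => d ≠ ':'))))
      else none := by
  induction xs generalizing buf with
  | nil => simp [checknewvarsAltGo]
  | cons c xs ih =>
    have hc : c ≠ '\n' := fun hh => h (hh ▸ List.mem_cons_self)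
    have h' : '\n' ∉ xs := fun hm => h (List.mem_cons_of_mem _ hm)
    by_cases hcol : c = ':'
    · subst hcol
      simp only [List.cons_append, checknewvarsAltGo, beq_iff_eq, hc, if_false]
      norm_num
      exact altGo_skip xs cs [] _ h'
    · simp only [List.cons_append, checknewvarsAltGo, beq_iff_eq, hc, hcol, if_false]
      norm_num [hcol]
      rw [ih _ h']
      rw [if_congr (or_iff_right (fun hh : ':' = c => hcol hh.symm)) rfl rfl]
      split_ifs with hm
      · congr 2
        simp [← String.ofList_append, decide_not, List.append_assoc]
      · rfl

theorem findgo_colon (l : List Char) (k : Nat) :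
    PySem.Chars.find.go [':'] l k =
      if ':' ∈ l then ((k + (l.takeWhile (fun d => d ≠ ':')).length : Nat) : Int) else -1 := by
  induction l generalizing k with
  | nil => simp [PySem.Chars.find.go]
  | cons c l ih =>
    by_cases hc : c = ':'
    · subst hc
      simp [PySem.Chars.find.go, List.isPrefixOf]
    · simp only [PySem.Chars.find.go]
      rw [if_neg (by simp [List.isPrefixOf]; exact Ne.symm hc), ih (k + 1)]
      by_cases hm : ':' ∈ l
      · simp only [hm, if_true, List.mem_cons, or_true, List.takeWhile_cons, decide_not, hc,
          decide_false, Bool.not_false, if_true]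
        simp only [List.length_cons]
        push_cast
        ring
      · simp [hm, Ne.symm hc]

theorem take_takeWhile_length (l : List Char) (p : Char → Bool) :
    l.take (l.takeWhile p).length = l.takeWhile p := by
  induction l with
  | nil => rfl
  | cons c l ih =>
    by_cases hc : p c = true
    · simp [List.takeWhile_cons, hc, ih]
    · simp [List.takeWhile_cons, hc]


-- single machine steps (cheap rewrites used by altGo_line)
theorem sNlF (cs buf : List Char) (names : PySem.Set String) (k : Nat) (hk : 1 < k) :
    checknewvarsAltGo ('\n'::cs) k buf names = none := by
  simp [checknewvarsAltGo]; omega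
theorem s0o (c : Char) (cs buf : List Char) (names : PySem.Set String)
    (h1 : c ≠ '\n') (h2 : c ≠ '-') (h3 : c ≠ '+') :
    checknewvarsAltGo (c::cs) 0 buf names = checknewvarsAltGo cs 1 buf names := by
  simp [checknewvarsAltGo, h1, h2, h3]
theorem s0m (cs buf : List Char) (names : PySem.Set String) :
    checknewvarsAltGo ('-'::cs) 0 buf names = checknewvarsAltGo cs 2 buf names := rfl
theorem s0p (cs buf : List Char) (names : PySem.Set String) :
    checknewvarsAltGo ('+'::cs) 0 buf names = checknewvarsAltGo cs 4 buf names := rfl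
theorem s2m (cs buf : List Char) (names : PySem.Set String) :
    checknewvarsAltGo ('-'::cs) 2 buf names = checknewvarsAltGo cs 3 buf names := rfl
theorem s2o (c : Char) (cs buf : List Char) (names : PySem.Set String)
    (h1 : c ≠ '\n') (h2 : c ≠ '-') :
    checknewvarsAltGo (c::cs) 2 buf names = none := by
  simp [checknewvarsAltGo, h1, h2]
theorem s3m (cs buf : List Char) (names : PySem.Set String) :
    checknewvarsAltGo ('-'::cs) 3 buf names = checknewvarsAltGo cs 1 buf names := rfl
theorem s3o (c : Char) (cs buf : List Char) (names : PySem.Set String)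
    (h1 : c ≠ '\n') (h2 : c ≠ '-') :
    checknewvarsAltGo (c::cs) 3 buf names = none := by
  simp [checknewvarsAltGo, h1, h2]
theorem s4p (cs buf : List Char) (names : PySem.Set String) :
    checknewvarsAltGo ('+'::cs) 4 buf names = checknewvarsAltGo cs 5 buf names := rfl
theorem s4s (cs buf : List Char) (names : PySem.Set String) :
    checknewvarsAltGo (' '::cs) 4 buf names = checknewvarsAltGo cs 6 buf names := rfl
theorem s4o (c : Char) (cs buf : List Char) (names : PySem.Set String)
    (h1 : c ≠ '\n') (h2 : c ≠ '+') (h3 : c ≠ ' ') :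
    checknewvarsAltGo (c::cs) 4 buf names = none := by
  simp [checknewvarsAltGo, h1, h2, h3]
theorem s5p (cs buf : List Char) (names : PySem.Set String) :
    checknewvarsAltGo ('+'::cs) 5 buf names = checknewvarsAltGo cs 1 buf names := rfl
theorem s5o (c : Char) (cs buf : List Char) (names : PySem.Set String)
    (h1 : c ≠ '\n') (h2 : c ≠ '+') :
    checknewvarsAltGo (c::cs) 5 buf names = none := by
  simp [checknewvarsAltGo, h1, h2]
theorem sSp (cs buf : List Char) (names : PySem.Set String) (k : Nat)
    (h6 : 6 ≤ k) (h9 : k ≤ 9) :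
    checknewvarsAltGo (' '::cs) k buf names = checknewvarsAltGo cs (k+1) buf names := by
  simp only [checknewvarsAltGo]
  rw [if_neg (by decide), if_neg (by simp; omega), if_neg (by simp; omega),
    if_neg (by simp; omega), if_neg (by simp; omega), if_neg (by simp; omega),
    if_neg (by simp; omega), if_pos (by omega)]
  simp
theorem sSo (c : Char) (cs buf : List Char) (names : PySem.Set String) (k : Nat)
    (h1 : c ≠ '\n') (h2 : c ≠ ' ') (h6 : 6 ≤ k) (h9 : k ≤ 9) :
    checknewvarsAltGo (c::cs) k buf names = none := by
  simp only [checknewvarsAltGo]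
  rw [if_neg (by simp [h1]), if_neg (by simp; omega), if_neg (by simp; omega),
    if_neg (by simp; omega), if_neg (by simp; omega), if_neg (by simp; omega),
    if_neg (by simp; omega), if_pos (by omega)]
  simp [h2]
theorem fgStep (c : Char) (l : List Char) (k : Nat) (h : c ≠ ':') :
    PySem.Chars.find.go [':'] (c::l) k = PySem.Chars.find.go [':'] l (k+1) := by
  rw [PySem.Chars.find.go]
  rw [if_neg (by simp [List.isPrefixOf]; exact Ne.symm h)]

set_option maxHeartbeats 1000000 in
theorem altGo_line (l : List Char) (cs : List Char) (names : PySem.Set String)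
    (h : '\n' ∉ l) :
    checknewvarsAltGo (l ++ '\n' :: cs) 0 [] names =
      (if String.ofList l == "" then checknewvarsAltGo cs 0 [] names
       else if PySem.Str.startswith (String.ofList l) "+++" || PySem.Str.startswith (String.ofList l) "---" then
         checknewvarsAltGo cs 0 [] names
       else if PySem.Str.pyGet? (String.ofList l) 0 == some '-' then none
       else if PySem.Str.pyGet? (String.ofList l) 0 == some '+' then
         let pos := PySem.Str.find (String.ofList l) ":"
         if PySem.Str.startswith (String.ofList l) "+     " && decide (0 < pos) then
           checknewvarsAltGo cs 0 []
             (PySem.Set.add names (PySem.Str.slice (String.ofList l) (some 6) (some pos)))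
         else none
       else checknewvarsAltGo cs 0 [] names) := by
  cases l with
  | nil => simp [checknewvarsAltGo]
  | cons c r =>
    have hc : c ≠ '\n' := fun hh => h (hh ▸ List.mem_cons_self)
    have hr : '\n' ∉ r := fun hm => h (List.mem_cons_of_mem _ hm)
    simp only [pysem, PySem.Chars.startswith, PySem.Chars.pyGet?_eq_listPyGet?,
      String.toList_ofList, show "+++".toList = ['+','+','+'] from rfl,
      show "---".toList = ['-','-','-'] from rfl,
      show "+     ".toList = ['+',' ',' ',' ',' ',' '] from rfl,
      show ":".toList = [':'] from rfl]
    have hne : (String.ofList (c :: r) == "") = false := by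
      refine beq_eq_false_iff_ne.mpr (fun hh => ?_)
      have := congrArg String.toList hh
      simp at this
    rw [hne]
    simp only [Bool.false_eq_true, if_false]
    by_cases h1 : c = '-'
    · subst h1
      match r, hr with
      | [], _ =>
        simp only [List.cons_append, List.nil_append]
        rw [s0m, sNlF _ _ _ _ (by omega)]
        rw [if_neg (by simp [List.isPrefixOf]), if_pos (by simp)]
      | c1 :: r1, hr =>
        have hc1n : c1 ≠ '\n' := fun hh => hr (hh ▸ List.mem_cons_self)
        have hr1 : '\n' ∉ r1 := fun hm => hr (List.mem_cons_of_mem _ hm)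
        by_cases hc1 : c1 = '-'
        · subst hc1
          match r1, hr1 with
          | [], _ =>
            simp only [List.cons_append, List.nil_append]
            rw [s0m, s2m, sNlF _ _ _ _ (by omega)]
            rw [if_neg (by simp [List.isPrefixOf]), if_pos (by simp)]
          | c2 :: r2, hr1 =>
            have hc2n : c2 ≠ '\n' := fun hh => hr1 (hh ▸ List.mem_cons_self)
            have hr2 : '\n' ∉ r2 := fun hm => hr1 (List.mem_cons_of_mem _ hm)
            by_cases hc2 : c2 = '-'
            · subst hc2
              simp only [List.cons_append, List.nil_append]
              rw [s0m, s2m, s3m, altGo_skip r2 cs [] names hr2]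
              rw [if_pos (by simp [List.isPrefixOf])]
            · simp only [List.cons_append, List.nil_append]
              rw [s0m, s2m, s3o _ _ _ _ hc2n hc2]
              rw [if_neg (by simp [List.isPrefixOf, hc2, Ne.symm hc2]), if_pos (by simp)]
        · simp only [List.cons_append, List.nil_append]
          rw [s0m, s2o _ _ _ _ hc1n hc1]
          rw [if_neg (by simp [List.isPrefixOf, hc1, Ne.symm hc1]), if_pos (by simp)]
    by_cases h2 : c = '+'
    · subst h2
      match r, hr with
      | [], _ =>
        simp only [List.cons_append, List.nil_append]
        rw [s0p, sNlF _ _ _ _ (by omega)]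
        rw [if_neg (by simp [List.isPrefixOf]), if_neg (by simp), if_pos (by simp)]
        simp [List.isPrefixOf]
      | c1 :: r1, hr =>
        have hc1n : c1 ≠ '\n' := fun hh => hr (hh ▸ List.mem_cons_self)
        have hr1 : '\n' ∉ r1 := fun hm => hr (List.mem_cons_of_mem _ hm)
        by_cases hc1 : c1 = '+'
        · subst hc1
          match r1, hr1 with
          | [], _ =>
            simp only [List.cons_append, List.nil_append]
            rw [s0p, s4p, sNlF _ _ _ _ (by omega)]
            rw [if_neg (by simp [List.isPrefixOf]), if_neg (by simp), if_pos (by simp)]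
            simp [List.isPrefixOf]
          | c2 :: r2, hr1 =>
            have hc2n : c2 ≠ '\n' := fun hh => hr1 (hh ▸ List.mem_cons_self)
            have hr2 : '\n' ∉ r2 := fun hm => hr1 (List.mem_cons_of_mem _ hm)
            by_cases hc2 : c2 = '+'
            · subst hc2
              simp only [List.cons_append, List.nil_append]
              rw [s0p, s4p, s5p, altGo_skip r2 cs [] names hr2]
              rw [if_pos (by simp [List.isPrefixOf])]
            · simp only [List.cons_append, List.nil_append]
              rw [s0p, s4p, s5o _ _ _ _ hc2n hc2]
              rw [if_neg (by simp [List.isPrefixOf, hc2, Ne.symm hc2]), if_neg (by simp),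
                if_pos (by simp)]
              simp [List.isPrefixOf]
        · by_cases hs1 : c1 = ' '
          · subst hs1
            match r1, hr1 with
            | [], _ =>
              simp only [List.cons_append, List.nil_append]
              rw [s0p, s4s, sNlF _ _ _ _ (by omega)]
              rw [if_neg (by simp [List.isPrefixOf]), if_neg (by simp), if_pos (by simp)]
              simp [List.isPrefixOf]
            | c2 :: r2, hr1 =>
              have hc2n : c2 ≠ '\n' := fun hh => hr1 (hh ▸ List.mem_cons_self)
              have hr2 : '\n' ∉ r2 := fun hm => hr1 (List.mem_cons_of_mem _ hm)
              by_cases hs2 : c2 = ' '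
              · subst hs2
                match r2, hr2 with
                | [], _ =>
                  simp only [List.cons_append, List.nil_append]
                  rw [s0p, s4s, sSp _ _ _ _ (by omega) (by omega), sNlF _ _ _ _ (by omega)]
                  rw [if_neg (by simp [List.isPrefixOf]), if_neg (by simp), if_pos (by simp)]
                  simp [List.isPrefixOf]
                | c3 :: r3, hr2 =>
                  have hc3n : c3 ≠ '\n' := fun hh => hr2 (hh ▸ List.mem_cons_self)
                  have hr3 : '\n' ∉ r3 := fun hm => hr2 (List.mem_cons_of_mem _ hm)
                  by_cases hs3 : c3 = ' '
                  · subst hs3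
                    match r3, hr3 with
                    | [], _ =>
                      simp only [List.cons_append, List.nil_append]
                      rw [s0p, s4s, sSp _ _ _ _ (by omega) (by omega),
                        sSp _ _ _ _ (by omega) (by omega), sNlF _ _ _ _ (by omega)]
                      rw [if_neg (by simp [List.isPrefixOf]), if_neg (by simp), if_pos (by simp)]
                      simp [List.isPrefixOf]
                    | c4 :: r4, hr3 =>
                      have hc4n : c4 ≠ '\n' := fun hh => hr3 (hh ▸ List.mem_cons_self)
                      have hr4 : '\n' ∉ r4 := fun hm => hr3 (List.mem_cons_of_mem _ hm)
                      by_cases hs4 : c4 = ' '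
                      · subst hs4
                        match r4, hr4 with
                        | [], _ =>
                          simp only [List.cons_append, List.nil_append]
                          rw [s0p, s4s, sSp _ _ _ _ (by omega) (by omega),
                            sSp _ _ _ _ (by omega) (by omega),
                            sSp _ _ _ _ (by omega) (by omega), sNlF _ _ _ _ (by omega)]
                          rw [if_neg (by simp [List.isPrefixOf]), if_neg (by simp), if_pos (by simp)]
                          simp [List.isPrefixOf]
                        | c5 :: r5, hr4 =>
                          have hc5n : c5 ≠ '\n' := fun hh => hr4 (hh ▸ List.mem_cons_self)
                          have hr5 : '\n' ∉ r5 := fun hm => hr4 (List.mem_cons_of_mem _ hm)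
                          by_cases hs5 : c5 = ' '
                          · subst hs5
                            simp only [List.cons_append, List.nil_append]
                            rw [s0p, s4s, sSp _ _ _ _ (by omega) (by omega),
                              sSp _ _ _ _ (by omega) (by omega),
                              sSp _ _ _ _ (by omega) (by omega),
                              sSp _ _ _ _ (by omega) (by omega)]
                            rw [if_neg (by simp [List.isPrefixOf]), if_neg (by simp),
                              if_pos (by simp)]
                            rw [altGo_name r5 cs [] names hr5]
                            have hfind : PySem.Chars.find ('+'::' '::' '::' '::' '::' '::r5) [':'] =
                                if ':' ∈ r5 then (((6 + (r5.takeWhile (fun d => d ≠ ':')).length : Nat)) : Int) else -1 := by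
                              show PySem.Chars.find.go [':'] _ 0 = _
                              rw [fgStep _ _ _ (by decide), fgStep _ _ _ (by decide),
                                fgStep _ _ _ (by decide), fgStep _ _ _ (by decide),
                                fgStep _ _ _ (by decide), fgStep _ _ _ (by decide),
                                findgo_colon]
                            by_cases hmem : ':' ∈ r5
                            · rw [if_pos hmem]
                              rw [if_pos (by
                                simp only [hfind, if_pos hmem, List.isPrefixOf, Bool.and_self,
                                  beq_self_eq_true, Bool.true_and, List.isPrefixOf_nil_left,
                                  decide_eq_true_eq, Bool.and_eq_true]
                                omega)]
                              have hslice : PySem.Str.slice (String.ofList ('+'::' '::' '::' '::' '::' '::r5)) (some 6)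
                                  (some (PySem.Chars.find ('+'::' '::' '::' '::' '::' '::r5) [':'])) =
                                  String.ofList (r5.takeWhile (fun d => d ≠ ':')) := by
                                rw [PySem.Str.slice]
                                congr 1
                                rw [String.toList_ofList, PySem.Chars.slice_eq_listSlice, hfind,
                                  if_pos hmem]
                                have h6n : (((6 + (r5.takeWhile (fun d => d ≠ ':')).length : Nat)) : Int) =
                                    ((6:Nat):Int) + (((r5.takeWhile (fun d => d ≠ ':')).length : Nat) : Int) := by
                                  push_cast; ring
                                rw [h6n, show (6:Int) = ((6:Nat):Int) from by norm_num,
                                  PySem.List.slice_natCast_add]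
                                simp [take_takeWhile_length]
                              rw [hslice]
                              simp
                            · rw [if_neg hmem]
                              rw [if_neg (by
                                rw [hfind, if_neg hmem]
                                simp)]
                          · simp only [List.cons_append, List.nil_append]
                            rw [s0p, s4s, sSp _ _ _ _ (by omega) (by omega),
                              sSp _ _ _ _ (by omega) (by omega),
                              sSp _ _ _ _ (by omega) (by omega),
                              sSo _ _ _ _ _ hc5n hs5 (by omega) (by omega)]
                            rw [if_neg (by simp [List.isPrefixOf]), if_neg (by simp), if_pos (by simp)]
                            simp [List.isPrefixOf, hs5, Ne.symm hs5]
                      · simp only [List.cons_append, List.nil_append]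
                        rw [s0p, s4s, sSp _ _ _ _ (by omega) (by omega),
                          sSp _ _ _ _ (by omega) (by omega),
                          sSo _ _ _ _ _ hc4n hs4 (by omega) (by omega)]
                        rw [if_neg (by simp [List.isPrefixOf]), if_neg (by simp), if_pos (by simp)]
                        simp [List.isPrefixOf, hs4, Ne.symm hs4]
                  · simp only [List.cons_append, List.nil_append]
                    rw [s0p, s4s, sSp _ _ _ _ (by omega) (by omega),
                      sSo _ _ _ _ _ hc3n hs3 (by omega) (by omega)]
                    rw [if_neg (by simp [List.isPrefixOf]), if_neg (by simp), if_pos (by simp)]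
                    simp [List.isPrefixOf, hs3, Ne.symm hs3]
              · simp only [List.cons_append, List.nil_append]
                rw [s0p, s4s, sSo _ _ _ _ _ hc2n hs2 (by omega) (by omega)]
                rw [if_neg (by simp [List.isPrefixOf]), if_neg (by simp), if_pos (by simp)]
                simp [List.isPrefixOf, hs2, Ne.symm hs2]
          · simp only [List.cons_append, List.nil_append]
            rw [s0p, s4o _ _ _ _ hc1n hc1 hs1]
            rw [if_neg (by simp [List.isPrefixOf, hc1, Ne.symm hc1]), if_neg (by simp),
              if_pos (by simp)]
            simp [List.isPrefixOf, hs1, Ne.symm hs1]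
    · rw [List.cons_append, s0o _ _ _ _ hc h1 h2, altGo_skip r cs [] names hr]
      rw [if_neg (by simp [List.isPrefixOf, h1, Ne.symm h1, h2, Ne.symm h2])]
      rw [if_neg (by simp [h1, Ne.symm h1]), if_neg (by simp [h2, Ne.symm h2])]

theorem splitOnGo_char (fuel : Nat) (l cur : List Char) (acc : List (List Char)) (hf : l.length ≤ fuel) :
    PySem.Chars.splitOn.go ['\n'] fuel l cur acc =
      acc.reverse ++ List.modifyHead (fun x => cur.reverse ++ x) (l.splitOn '\n') := by
  induction fuel generalizing l cur acc with
  | zero =>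
    have hl : l = [] := List.eq_nil_of_length_eq_zero (Nat.le_zero.mp hf)
    subst hl
    rw [PySem.Chars.splitOn.go]
    simp [List.splitOn]
  | succ fuel ih =>
    cases l with
    | nil =>
      rw [PySem.Chars.splitOn.go]
      simp [List.splitOn]
      omega
    | cons c l =>
      by_cases hc : c = '\n'
      · subst hc
        rw [PySem.Chars.splitOn.go]
        simp only [List.isPrefixOf, beq_self_eq_true, Bool.true_and, List.isPrefixOf_nil_left,
          if_true, List.length_singleton, List.drop_one, List.tail_cons]
        rw [ih l [] _ (by simpa using Nat.lt_succ_iff.mp (by simpa using hf))]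
        simp [List.splitOn, List.splitOnP_cons]
        exact congrFun List.modifyHead_id _
      · rw [PySem.Chars.splitOn.go]
        rw [if_neg (by simp [List.isPrefixOf]; exact Ne.symm hc)]
        rw [ih l (c::cur) acc (by simpa using Nat.lt_succ_iff.mp (by simpa using hf))]
        simp only [List.splitOn, List.splitOnP_cons]
        rw [if_neg (by simp [hc])]
        rw [List.modifyHead_modifyHead]
        have hfun : (fun x => cur.reverse ++ x) ∘ List.cons c = fun x => (c::cur).reverse ++ x := by
          funext x
          simp
        rw [hfun]

theorem splitOn_char (s : List Char) :
    PySem.Chars.splitOn s ['\n'] = s.splitOn '\n' := by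
  rw [PySem.Chars.splitOn, splitOnGo_char _ _ _ _ (by omega)]
  simp
  exact congrFun List.modifyHead_id _

theorem altGo_main (n : Nat) : ∀ (s : List Char) (names : PySem.Set String), s.length ≤ n →
    checknewvarsAltGo (s ++ ['\n']) 0 [] names =
      checknewvarsGo ((s.splitOn '\n').map String.ofList) names := by
  induction n with
  | zero =>
    intro s names hn
    have hs : s = [] := List.eq_nil_of_length_eq_zero (Nat.le_zero.mp hn)
    subst hs
    simp [checknewvarsAltGo, checknewvarsGo, List.splitOn]
  | succ n ih =>
    intro s names hn
    by_cases hmem : '\n' ∈ s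
    · -- split off the first line
      set tw := s.takeWhile (fun c => c ≠ '\n') with htw
      have hdne : s.dropWhile (fun c => c ≠ '\n') ≠ [] := by
        intro hnil
        have := (List.dropWhile_eq_nil_iff).mp hnil '\n' hmem
        simp at this
      obtain ⟨d, rest, hd⟩ := List.exists_cons_of_ne_nil hdne
      have hdN : d = '\n' := by
        have h0 := List.head_dropWhile_not (fun c => decide (c ≠ '\n')) (l := s) hdne
        revert h0
        generalize hq : List.dropWhile (fun c => decide (c ≠ '\n')) s = q at hd hdne ⊢
        subst hd
        intro h0
        simpa using h0
      have hsplit : s = tw ++ '\n' :: rest := by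
        conv_lhs => rw [← List.takeWhile_append_dropWhile (p := fun c => decide (c ≠ '\n')) (l := s)]
        rw [hd, hdN]
      have htwN : '\n' ∉ tw := by
        intro hm
        have := List.mem_takeWhile_imp hm
        simp at this
      have hlen : rest.length ≤ n := by
        have := congrArg List.length hsplit
        simp at this
        omega
      have hsp : s.splitOn '\n' = tw :: rest.splitOn '\n' := by
        rw [hsplit]
        simp only [List.splitOn]
        exact List.splitOnP_first _ tw (fun x hx => by
          simpa using List.mem_takeWhile_imp hx) '\n' (by simp) rest
      rw [hsp, hsplit, List.append_assoc, List.cons_append]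
      rw [altGo_line tw ((rest ++ ['\n'])) names htwN]
      simp only [List.map_cons, checknewvarsGo]
      split_ifs <;> first
        | rfl
        | exact ih rest names hlen
        | exact ih rest _ hlen
    · have hsp : s.splitOn '\n' = [s] := by
        simp only [List.splitOn]
        exact List.splitOnP_eq_single _ s (fun x hx => by
          simp only [beq_iff_eq]
          exact fun hh => hmem (hh ▸ hx))
      have h1 : s ++ ['\n'] = s ++ '\n' :: [] := rfl
      rw [hsp, h1, altGo_line s [] names hmem]
      simp only [List.map_cons, List.map_nil, checknewvarsGo]
      split_ifs <;> rfl

-- ===== VERDICT (by name: the statement is the Claim_ definition above) =====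
theorem checknewvars_spec : Claim_equal_checknewvars := by
  intro output _
  unfold Spec_checknewvars checknewvars checknewvars_alt
  have hs : PySem.Str.split? output "\n" =
      some ((PySem.Chars.splitOn output.toList ['\n']).map String.ofList) := by
    simp [PySem.Str.split?, PySem.Chars.split?]
  rw [hs, splitOn_char]
  exact (altGo_main output.toList.length output.toList PySem.Set.empty le_rfl).symm
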